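-- pv_equiv track=rewrite | github.com/Aho-Wono/ILASmahjong | ripai.py | ripai
-- ===== SOURCE A (Python) =====
-- def ripai(hai_li):
-- 	suhai_li = []
-- 	jihai_li = []
-- 	jihai_li_new = []
--
-- 	for hai in hai_li:
-- 		if len(hai) == 2: suhai_li.append(hai)
-- 		else            : jihai_li.append(hai)
--
-- 	for jihai in ["ton", "nan", "sha", "pei", "haku", "hatu", "chun"]:
--
-- 		while True:
-- 			if jihai in jihai_li:
-- 				jihai_li_new.append(jihai)
-- 				jihai_li.remove(jihai)
-- 			else: break
--
-- 	return sorted(suhai_li) + jihai_li_new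
-- ===== SOURCE B (Python) =====
-- def ripai(hai_li):
--     order = ["ton", "nan", "sha", "pei", "haku", "hatu", "chun"]
--     suhai = []
--     counts = {}
--     for h in hai_li:
--         if len(h) == 2:
--             suhai.append(h)
--         else:
--             counts[h] = counts.get(h, 0) + 1
--     honors = [h for h in order for _ in range(counts.get(h, 0))]
--     return sorted(suhai) + honors
-- ===== Notes on version B (the rewrite author's own statement) =====
-- stated objective: simpler
-- what changed: B replaces A's seven-pass bucket collection (a while-loop per honor doing repeated 'in' membership scans and list.remove over the honor list) with a single-pass counter dict followed by one emit pass over the fixed honor order.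
import Mathlib
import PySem

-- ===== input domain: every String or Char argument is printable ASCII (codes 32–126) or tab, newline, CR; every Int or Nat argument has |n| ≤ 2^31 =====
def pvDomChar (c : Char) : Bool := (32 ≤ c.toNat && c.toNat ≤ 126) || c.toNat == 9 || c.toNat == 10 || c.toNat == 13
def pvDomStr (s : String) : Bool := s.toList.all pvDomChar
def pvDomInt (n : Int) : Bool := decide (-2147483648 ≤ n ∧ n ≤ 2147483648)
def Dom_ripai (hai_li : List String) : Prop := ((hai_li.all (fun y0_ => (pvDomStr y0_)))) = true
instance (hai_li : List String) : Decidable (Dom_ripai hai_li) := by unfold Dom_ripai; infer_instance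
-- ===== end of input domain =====

-- B replaces A's seven repeated membership-scan/remove while-loops with a single-pass counter
-- dict and one emit pass over the fixed honor order (simpler, one pass over the input).


-- ===== PORT A =====
-- termination measure for A's while loop: removing a present element shortens the list
theorem pvEraseLt (li : List String) (o : String) (h : o ∈ li) :
    (li.erase o).length < li.length := by
  have h1 := List.length_erase_of_mem h
  have h2 : 0 < li.length := List.length_pos_of_mem h
  omega

-- A's inner `while True: if jihai in jihai_li: append; jihai_li.remove(jihai); else break`;
-- state is (jihai_li, jihai_li_new).  `list.remove` of a PRESENT element is List.erase
-- (PySem.List.remove?_eq_some_erase), exact here because the branch checks membership first.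
def ripaiWhile (jihai : String) (li acc : List String) : List String × List String :=
  if h : jihai ∈ li then
    ripaiWhile jihai (li.erase jihai) (acc ++ [jihai])
  else (li, acc)
termination_by li.length
decreasing_by exact pvEraseLt li jihai h

def ripai (hai_li : List String) : List String :=
  let p := hai_li.foldl
    (fun (p : List String × List String) hai =>
      if PySem.Str.len hai = 2 then (p.1 ++ [hai], p.2) else (p.1, p.2 ++ [hai]))
    ([], [])
  let q := ["ton", "nan", "sha", "pei", "haku", "hatu", "chun"].foldl
    (fun (q : List String × List String) jihai => ripaiWhile jihai q.1 q.2) (p.2, [])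
  PySem.List.sorted p.1 (fun x => x) ++ q.2

-- ===== PORT B =====
-- single pass: suhai list + counter dict; then emit each honor `count` times
-- (`[h for _ in range(n)]` ported as List.replicate n.toNat h; exact since counts are ≥ 0).
def ripai_alt (hai_li : List String) : List String :=
  let p := hai_li.foldl
    (fun (p : List String × PySem.Dict String Int) h =>
      if PySem.Str.len h = 2 then (p.1 ++ [h], p.2)
      else (p.1, p.2.insert h (p.2.getD h 0 + 1)))
    ([], PySem.Dict.empty)
  let honors := ["ton", "nan", "sha", "pei", "haku", "hatu", "chun"].flatMap
    (fun h => List.replicate (p.2.getD h 0).toNat h)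
  PySem.List.sorted p.1 (fun x => x) ++ honors

-- ===== PRECONDITION & SPEC =====
def Spec_ripai (hai_li : List String) (out : List String) : Prop := out = ripai_alt hai_li
instance (hai_li : List String) (out : List String) : Decidable (Spec_ripai hai_li out) := by unfold Spec_ripai; infer_instance

-- ===== CLAIM (what is proved, stated in full; the proofs are below) =====
def Claim_equal_ripai : Prop := ∀ (hai_li : List String), Dom_ripai hai_li → Spec_ripai hai_li (ripai hai_li)

-- ===== LEMMAS AND PROOFS =====

-- A's partition fold appends the two filters.
theorem foldA_eq (l : List String) (s j : List String) :
    l.foldl (fun (p : List String × List String) hai =>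
      if PySem.Str.len hai = 2 then (p.1 ++ [hai], p.2) else (p.1, p.2 ++ [hai])) (s, j)
    = (s ++ l.filter (fun h => PySem.Str.len h = 2),
       j ++ l.filter (fun h => ¬ PySem.Str.len h = 2)) := by
  induction l generalizing s j with
  | nil => simp
  | cons x xs ih =>
    rw [List.foldl_cons, List.filter_cons, List.filter_cons]
    by_cases hx : PySem.Str.len x = 2
    · rw [if_pos hx, ih]
      have hx' : ((x.length : Int) = 2) := by simpa using hx
      simp [hx']
    · rw [if_neg hx, ih]
      have hx' : ¬((x.length : Int) = 2) := by simpa using hx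
      simp [hx']

-- B's fold: suhai part appends the same filter, dict part folds over the other filter.
theorem foldB_eq (l : List String) (s : List String) (d : PySem.Dict String Int) :
    l.foldl (fun (p : List String × PySem.Dict String Int) h =>
      if PySem.Str.len h = 2 then (p.1 ++ [h], p.2)
      else (p.1, p.2.insert h (p.2.getD h 0 + 1))) (s, d)
    = (s ++ l.filter (fun h => PySem.Str.len h = 2),
       (l.filter (fun h => ¬ PySem.Str.len h = 2)).foldl
         (fun d x => d.insert x (d.getD x 0 + 1)) d) := by
  induction l generalizing s d with
  | nil => simp
  | cons x xs ih =>
    rw [List.foldl_cons, List.filter_cons, List.filter_cons]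
    by_cases hx : PySem.Str.len x = 2
    · rw [if_pos hx, ih]
      have hx' : ((x.length : Int) = 2) := by simpa using hx
      simp [hx']
    · rw [if_neg hx, ih]
      have hx' : ¬((x.length : Int) = 2) := by simpa using hx
      simp [hx']

-- erasing one copy of o does not change the o-free sublist
theorem filter_erase (li : List String) (o : String) :
    (li.erase o).filter (fun x => x ≠ o) = li.filter (fun x => x ≠ o) := by
  induction li with
  | nil => rfl
  | cons x xs ih =>
    by_cases hx : x = o
    · subst hx; simp [List.erase_cons_head]
    · rw [List.erase_cons_tail (by simp [hx]), List.filter_cons, List.filter_cons, ih]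

-- the while loop drains all occurrences of o, appending one copy per occurrence
theorem ripaiWhile_eq (o : String) (li acc : List String) :
    ripaiWhile o li acc
    = (li.filter (fun x => x ≠ o), acc ++ List.replicate (li.count o) o) := by
  by_cases h : o ∈ li
  · rw [ripaiWhile, dif_pos h, ripaiWhile_eq o (li.erase o) (acc ++ [o]),
      filter_erase, List.count_erase_self, Prod.mk.injEq]
    refine ⟨rfl, ?_⟩
    have hpos : 0 < li.count o := List.count_pos_iff.mpr h
    rw [List.append_assoc]
    congr 1
    have hc : li.count o = 1 + (li.count o - 1) := by omega
    conv_rhs => rw [hc, List.replicate_add]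
    simp
  · have hf : li.filter (fun x => x ≠ o) = li :=
      List.filter_eq_self.mpr (fun a ha => by
        simp only [decide_eq_true_eq]
        rintro rfl; exact h ha)
    rw [ripaiWhile, dif_neg h, hf, List.count_eq_zero.mpr h]
    simp
termination_by li.length
decreasing_by exact pvEraseLt li o h

theorem count_filter_ne (li : List String) (o o' : String) (hne : o' ≠ o) :
    (li.filter (fun x => x ≠ o)).count o' = li.count o' := by
  rw [List.count_filter]; simp [hne]

theorem flatMap_congr' {α β : Type} (l : List α) (f g : α → List β)
    (h : ∀ a ∈ l, f a = g a) : l.flatMap f = l.flatMap g := by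
  induction l with
  | nil => rfl
  | cons x xs ih =>
    rw [List.flatMap_cons, List.flatMap_cons, h x (by simp),
      ih (fun a ha => h a (by simp [ha]))]

-- the fold of the while-loops over a duplicate-free honor list
theorem foldWhile_eq (os : List String) (li acc : List String) (hnd : os.Nodup) :
    (os.foldl (fun (q : List String × List String) j => ripaiWhile j q.1 q.2) (li, acc)).2
    = acc ++ os.flatMap (fun o => List.replicate (li.count o) o) := by
  induction os generalizing li acc with
  | nil => simp
  | cons o rest ih =>
    have hnd' : rest.Nodup := (List.nodup_cons.mp hnd).2
    have hno : o ∉ rest := (List.nodup_cons.mp hnd).1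
    have step : (List.foldl (fun (q : List String × List String) j => ripaiWhile j q.1 q.2) (li, acc) (o :: rest))
        = (List.foldl (fun (q : List String × List String) j => ripaiWhile j q.1 q.2)
            (li.filter (fun x => x ≠ o), acc ++ List.replicate (li.count o) o) rest) := by
      rw [List.foldl_cons]
      congr 1
      exact ripaiWhile_eq o li acc
    rw [step, ih _ _ hnd', List.flatMap_cons, ← List.append_assoc]
    congr 1
    exact flatMap_congr' rest _ _ (fun o' ho' =>
      by rw [count_filter_ne li o o' (by rintro rfl; exact hno ho')])

-- ===== VERDICT (by name: the statement is the Claim_ definition above) =====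
theorem ripai_spec : Claim_equal_ripai := by
  intro hai_li _
  unfold Spec_ripai ripai ripai_alt
  simp only [foldA_eq, foldB_eq]
  have hnd : (["ton", "nan", "sha", "pei", "haku", "hatu", "chun"] : List String).Nodup := by
    decide
  rw [foldWhile_eq _ _ _ hnd]
  simp only [List.nil_append]
  congr 1
  refine flatMap_congr' _ _ _ (fun o _ => ?_)
  rw [PySem.Dict.getD_foldl_insert_add_one, PySem.Dict.getD_empty]
  simp
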